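-- pv_equiv track=rewrite | github.com/annesnour03/euler | 51-100/87_prime_power_triples.py | solve
-- ===== SOURCE A (Python) =====
-- import math
--
-- def isprime(x):
--     if(x == 2):
--         return True
--     if(x % 2 == 0):
--         return False
--     for i in range(3, int(math.sqrt(abs(x))) + 1, 2):
--         if x % i == 0:
--             return False
--     return True
--
-- def getprimes(limit):
--     res = []
--     for i in range(2,limit):
--         if(isprime(i)):
--             res.append(i)
--     return res
--
-- def solve(limit):
--     r = set()
--     primes = getprimes(math.isqrt(limit) + 1)
--     p2 = [p*p for p in primes if p*p < limit]
--     p3 = [p*p*p for p in primes if p*p*p < limit]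
--     p4 = [p*p*p*p for p in primes if p*p*p*p < limit]
--     for c2 in p2:
--         for c3 in p3:
--             if c2 + c3 > limit:
--                 break
--             for c4 in p4:
--                 if c2 + c3 + c4 > limit:
--                     break
--                 r.add((c2 + c3 + c4))
--     return len(r)
-- ===== SOURCE B (Python) =====
-- import math
--
--
-- def _isprime(x):
--     return x == 2 or (x % 2 != 0 and
--                       all(x % d for d in range(3, int(math.sqrt(abs(x))) + 1, 2)))
--
--
-- def solve(limit):
--     primes = [i for i in range(2, math.isqrt(limit) + 1) if _isprime(i)]
--     squares = [p * p for p in primes if p * p < limit]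
--     cubes = [p ** 3 for p in primes if p ** 3 < limit]
--     fourths = [p ** 4 for p in primes if p ** 4 < limit]
--     pair_sums = {a + b for a in squares for b in cubes if a + b <= limit}
--     return len({s + c for s in pair_sums for c in fourths if s + c <= limit})
-- ===== Notes on version B (the rewrite author's own statement) =====
-- stated objective: simpler
-- what changed: replaces the triple nested loop with sorted-order break pruning by a two-stage set pipeline (build the set of square+cube pair sums <= limit, then combine it with fourth powers), with primes via a filter comprehension and an all()-expression primality test instead of explicit loops with early returns
import Mathlib
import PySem

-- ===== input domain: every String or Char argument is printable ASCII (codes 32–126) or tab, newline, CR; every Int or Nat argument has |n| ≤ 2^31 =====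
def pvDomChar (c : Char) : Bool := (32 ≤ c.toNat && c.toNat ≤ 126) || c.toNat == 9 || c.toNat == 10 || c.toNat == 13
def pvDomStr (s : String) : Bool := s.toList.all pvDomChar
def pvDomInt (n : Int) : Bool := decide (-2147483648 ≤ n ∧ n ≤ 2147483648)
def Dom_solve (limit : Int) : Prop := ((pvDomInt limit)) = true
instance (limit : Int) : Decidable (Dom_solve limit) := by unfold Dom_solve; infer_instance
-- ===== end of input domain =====

-- B restructures A's triple nested loop (with break pruning) into a two-stage set pipeline
-- over a precomputed pair-sum set; same value everywhere A returns (objective: simpler).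

-- ===== PORT A =====
-- int(math.sqrt(abs(x))) : exact as the integer square root of |x| on every call this file
-- makes (arguments are at most isqrt(2^31) < 2^26, far below where float sqrt drifts from isqrt)
def pyFloatSqrtFloor (x : Int) : Int := (Nat.sqrt x.natAbs : Int)

-- the 'for i in range(3, …, 2): if x % i == 0: return False' loop of isprime
def isprimeLoop (x : Int) : List Int → Bool
  | [] => true
  | i :: rest => if PySem.Int.mod x i = 0 then false else isprimeLoop x rest

def isprime (x : Int) : Bool :=
  if x = 2 then true
  else if PySem.Int.mod x 2 = 0 then false
  else isprimeLoop x (PySem.List.pyRange 3 (pyFloatSqrtFloor x + 1) 2)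

def getprimes (limit : Int) : List Int :=
  (PySem.List.pyRange 2 limit 1).foldl
    (fun res i => if isprime i then res ++ [i] else res) []

-- innermost 'for c4 in p4: if c2+c3+c4 > limit: break; r.add(…)'
def solveInner3 (limit c2 c3 : Int) : List Int → PySem.Set Int → PySem.Set Int
  | [], r => r
  | c4 :: rest, r =>
      if c2 + c3 + c4 > limit then r
      else solveInner3 limit c2 c3 rest (PySem.Set.add r (c2 + c3 + c4))

-- middle 'for c3 in p3: if c2+c3 > limit: break; …'
def solveInner2 (limit c2 : Int) (p4 : List Int) : List Int → PySem.Set Int → PySem.Set Int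
  | [], r => r
  | c3 :: rest, r =>
      if c2 + c3 > limit then r
      else solveInner2 limit c2 p4 rest (solveInner3 limit c2 c3 p4 r)

def solve (limit : Int) : Int :=
  let primes := getprimes ((Nat.sqrt limit.toNat : Int) + 1)  -- math.isqrt(limit)+1; limit ≥ 0 by Pre_
  let p2 := (primes.filter (fun p => decide (p*p < limit))).map (fun p => p*p)
  let p3 := (primes.filter (fun p => decide (p*p*p < limit))).map (fun p => p*p*p)
  let p4 := (primes.filter (fun p => decide (p*p*p*p < limit))).map (fun p => p*p*p*p)
  let r : PySem.Set Int := p2.foldl (fun r c2 => solveInner2 limit c2 p4 p3 r) PySem.Set.empty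
  PySem.Set.len r

-- ===== PORT B =====
def isprime_alt (x : Int) : Bool :=
  x == 2 || (!(PySem.Int.mod x 2 == 0) &&
    (PySem.List.pyRange 3 (pyFloatSqrtFloor x + 1) 2).all (fun d => !(PySem.Int.mod x d == 0)))

def solve_alt (limit : Int) : Int :=
  let primes := (PySem.List.pyRange 2 ((Nat.sqrt limit.toNat : Int) + 1) 1).filter isprime_alt
  let squares := (primes.filter (fun p => decide (p*p < limit))).map (fun p => p*p)
  let cubes := (primes.filter (fun p => decide (p*p*p < limit))).map (fun p => p*p*p)
  let fourths := (primes.filter (fun p => decide (p*p*p*p < limit))).map (fun p => p*p*p*p)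
  let pairSums : PySem.Set Int := squares.foldl (fun s a =>
      cubes.foldl (fun s b => if a + b ≤ limit then PySem.Set.add s (a + b) else s) s)
      PySem.Set.empty
  let r : PySem.Set Int := pairSums.foldl (fun s sv =>
      fourths.foldl (fun s c => if sv + c ≤ limit then PySem.Set.add s (sv + c) else s) s)
      PySem.Set.empty
  PySem.Set.len r

-- ===== PRECONDITION & SPEC =====
-- Pre_ excludes negative limits, on which math.isqrt raises ValueError in A (and in B).
def Pre_solve (limit : Int) : Prop := 0 ≤ limit
instance (limit : Int) : Decidable (Pre_solve limit) := by unfold Pre_solve; infer_instance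
def pvWitness_solve : Int := (100)

def Spec_solve (limit : Int) (out : Int) : Prop := out = solve_alt limit
instance (limit : Int) (out : Int) : Decidable (Spec_solve limit out) := by unfold Spec_solve; infer_instance

-- ===== CLAIM (what is proved, stated in full; the proofs are below) =====
def Claim_equal_solve : Prop := ∀ (limit : Int), Dom_solve limit → Pre_solve limit → Spec_solve limit (solve limit)

-- ===== LEMMAS AND PROOFS =====

lemma isprimeLoop_eq_all (x : Int) (l : List Int) :
    isprimeLoop x l = l.all (fun d => !(PySem.Int.mod x d == 0)) := by
  induction l with
  | nil => rfl
  | cons i rest ih =>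
      simp only [isprimeLoop, List.all_cons]
      by_cases h : PySem.Int.mod x i = 0 <;> simp [h, ih]

lemma isprime_eq (x : Int) : isprime x = isprime_alt x := by
  unfold isprime isprime_alt
  rw [isprimeLoop_eq_all]
  by_cases h2 : x = 2
  · simp [h2]
  · rw [if_neg h2]
    have hbeq : (x == 2) = false := by simp [h2]
    rw [hbeq, Bool.false_or]
    by_cases hm : PySem.Int.mod x 2 = 0
    · rw [if_pos hm, show (PySem.Int.mod x 2 == 0) = true from by rw [hm]; rfl,
          Bool.not_true, Bool.false_and]
    · rw [if_neg hm, show (PySem.Int.mod x 2 == 0) = false from beq_eq_false_iff_ne.mpr hm,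
          Bool.not_false, Bool.true_and]

lemma getprimes_eq (n : Int) :
    getprimes n = (PySem.List.pyRange 2 n 1).filter isprime_alt := by
  unfold getprimes
  rw [PySem.List.foldl_append_if_eq_filter]
  simp [List.filter_congr (fun x _ => isprime_eq x)]

-- membership in the innermost break loop, assuming p4 weakly ascending
lemma mem_solveInner3 (limit c2 c3 : Int) (p4 : List Int) (r : PySem.Set Int)
    (hs : p4.Pairwise (· ≤ ·)) (a : Int) :
    a ∈ solveInner3 limit c2 c3 p4 r ↔
      a ∈ r ∨ ∃ c4 ∈ p4, c2 + c3 + c4 ≤ limit ∧ a = c2 + c3 + c4 := by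
  induction p4 generalizing r with
  | nil => simp [solveInner3]
  | cons c4 rest ih =>
      rcases List.pairwise_cons.mp hs with ⟨hhead, hrest⟩
      by_cases h : c2 + c3 + c4 > limit
      · simp only [solveInner3, if_pos h]
        constructor
        · intro hr; exact Or.inl hr
        · rintro (hr | ⟨c4', hc4', hle, rfl⟩)
          · exact hr
          · rcases List.mem_cons.mp hc4' with rfl | hmem
            · omega
            · have := hhead _ hmem; omega
      · simp only [solveInner3, if_neg h]
        rw [ih _ hrest]
        simp only [PySem.Set.mem_add]
        constructor
        · rintro ((hr | rfl) | ⟨c4', hc4', hle, rfl⟩)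
          · exact Or.inl hr
          · exact Or.inr ⟨c4, List.mem_cons_self, by omega, rfl⟩
          · exact Or.inr ⟨c4', List.mem_cons_of_mem _ hc4', hle, rfl⟩
        · rintro (hr | ⟨c4', hc4', hle, rfl⟩)
          · exact Or.inl (Or.inl hr)
          · rcases List.mem_cons.mp hc4' with rfl | hmem
            · exact Or.inl (Or.inr rfl)
            · exact Or.inr ⟨c4', hmem, hle, rfl⟩

lemma mem_solveInner2 (limit c2 : Int) (p4 p3 : List Int) (r : PySem.Set Int)
    (hs3 : p3.Pairwise (· ≤ ·)) (hs4 : p4.Pairwise (· ≤ ·))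
    (h4 : ∀ c ∈ p4, 0 ≤ c) (a : Int) :
    a ∈ solveInner2 limit c2 p4 p3 r ↔
      a ∈ r ∨ ∃ c3 ∈ p3, ∃ c4 ∈ p4, c2 + c3 + c4 ≤ limit ∧ a = c2 + c3 + c4 := by
  induction p3 generalizing r with
  | nil => simp [solveInner2]
  | cons c3 rest ih =>
      rcases List.pairwise_cons.mp hs3 with ⟨hhead, hrest⟩
      by_cases h : c2 + c3 > limit
      · simp only [solveInner2, if_pos h]
        constructor
        · intro hr; exact Or.inl hr
        · rintro (hr | ⟨c3', hc3', c4, hc4, hle, rfl⟩)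
          · exact hr
          · have h0 := h4 _ hc4
            rcases List.mem_cons.mp hc3' with rfl | hmem
            · omega
            · have := hhead _ hmem; omega
      · simp only [solveInner2, if_neg h]
        rw [ih _ hrest, mem_solveInner3 _ _ _ _ _ hs4]
        constructor
        · rintro ((hr | ⟨c4, hc4, hle, rfl⟩) | ⟨c3', hc3', c4, hc4, hle, rfl⟩)
          · exact Or.inl hr
          · exact Or.inr ⟨c3, List.mem_cons_self, c4, hc4, hle, rfl⟩
          · exact Or.inr ⟨c3', List.mem_cons_of_mem _ hc3', c4, hc4, hle, rfl⟩
        · rintro (hr | ⟨c3', hc3', c4, hc4, hle, rfl⟩)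
          · exact Or.inl (Or.inl hr)
          · rcases List.mem_cons.mp hc3' with rfl | hmem
            · exact Or.inl (Or.inr ⟨c4, hc4, hle, rfl⟩)
            · exact Or.inr ⟨c3', hmem, c4, hc4, hle, rfl⟩

lemma mem_outer (limit : Int) (p2 p3 p4 : List Int) (r : PySem.Set Int)
    (hs3 : p3.Pairwise (· ≤ ·)) (hs4 : p4.Pairwise (· ≤ ·))
    (h4 : ∀ c ∈ p4, 0 ≤ c) (a : Int) :
    a ∈ p2.foldl (fun r c2 => solveInner2 limit c2 p4 p3 r) r ↔
      a ∈ r ∨ ∃ c2 ∈ p2, ∃ c3 ∈ p3, ∃ c4 ∈ p4, c2 + c3 + c4 ≤ limit ∧ a = c2 + c3 + c4 := by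
  induction p2 generalizing r with
  | nil => simp
  | cons c2 rest ih =>
      simp only [List.foldl_cons]
      rw [ih, mem_solveInner2 _ _ _ _ _ hs3 hs4 h4]
      constructor
      · rintro ((hr | ⟨c3, hc3, c4, hc4, hle, rfl⟩) | ⟨c2', hc2', rest'⟩)
        · exact Or.inl hr
        · exact Or.inr ⟨c2, List.mem_cons_self, c3, hc3, c4, hc4, hle, rfl⟩
        · exact Or.inr ⟨c2', List.mem_cons_of_mem _ hc2', rest'⟩
      · rintro (hr | ⟨c2', hc2', rest'⟩)
        · exact Or.inl (Or.inl hr)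
        · rcases List.mem_cons.mp hc2' with rfl | hmem
          · exact Or.inl (Or.inr rest')
          · exact Or.inr ⟨c2', hmem, rest'⟩

-- generic membership / nodup lemmas for B's 'add-if' folds
lemma mem_foldl_add_if {α : Type} (l : List α) (s : PySem.Set Int)
    (P : α → Prop) [DecidablePred P] (g : α → Int) (a : Int) :
    a ∈ l.foldl (fun s b => if P b then PySem.Set.add s (g b) else s) s ↔
      a ∈ s ∨ ∃ b ∈ l, P b ∧ a = g b := by
  induction l generalizing s with
  | nil => simp
  | cons b rest ih =>
      simp only [List.foldl_cons]
      rw [ih]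
      by_cases h : P b
      · simp only [if_pos h, PySem.Set.mem_add]
        constructor
        · rintro ((hs | rfl) | ⟨b', hb', hp, rfl⟩)
          · exact Or.inl hs
          · exact Or.inr ⟨b, List.mem_cons_self, h, rfl⟩
          · exact Or.inr ⟨b', List.mem_cons_of_mem _ hb', hp, rfl⟩
        · rintro (hs | ⟨b', hb', hp, rfl⟩)
          · exact Or.inl (Or.inl hs)
          · rcases List.mem_cons.mp hb' with rfl | hmem
            · exact Or.inl (Or.inr rfl)
            · exact Or.inr ⟨b', hmem, hp, rfl⟩
      · simp only [if_neg h]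
        constructor
        · rintro (hs | ⟨b', hb', hp, rfl⟩)
          · exact Or.inl hs
          · exact Or.inr ⟨b', List.mem_cons_of_mem _ hb', hp, rfl⟩
        · rintro (hs | ⟨b', hb', hp, rfl⟩)
          · exact Or.inl hs
          · rcases List.mem_cons.mp hb' with rfl | hmem
            · exact absurd hp h
            · exact Or.inr ⟨b', hmem, hp, rfl⟩

lemma nodup_foldl_add_if {α : Type} (l : List α) (s : PySem.Set Int)
    (P : α → Prop) [DecidablePred P] (g : α → Int) (hnd : s.Nodup) :
    (l.foldl (fun s b => if P b then PySem.Set.add s (g b) else s) s).Nodup := by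
  induction l generalizing s with
  | nil => exact hnd
  | cons b rest ih =>
      simp only [List.foldl_cons]
      by_cases h : P b
      · simp only [if_pos h]; exact ih _ (PySem.Set.nodup_add _ _ hnd)
      · simp only [if_neg h]; exact ih _ hnd

lemma nodup_solveInner3 (limit c2 c3 : Int) (p4 : List Int) (r : PySem.Set Int)
    (hnd : r.Nodup) : (solveInner3 limit c2 c3 p4 r).Nodup := by
  induction p4 generalizing r with
  | nil => exact hnd
  | cons c4 rest ih =>
      simp only [solveInner3]
      split
      · exact hnd
      · exact ih _ (PySem.Set.nodup_add _ _ hnd)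

lemma nodup_solveInner2 (limit c2 : Int) (p4 p3 : List Int) (r : PySem.Set Int)
    (hnd : r.Nodup) : (solveInner2 limit c2 p4 p3 r).Nodup := by
  induction p3 generalizing r with
  | nil => exact hnd
  | cons c3 rest ih =>
      simp only [solveInner2]
      split
      · exact hnd
      · exact ih _ (nodup_solveInner3 _ _ _ _ _ hnd)

lemma nodup_outer (limit : Int) (p2 p3 p4 : List Int) (r : PySem.Set Int)
    (hnd : r.Nodup) :
    (p2.foldl (fun r c2 => solveInner2 limit c2 p4 p3 r) r).Nodup := by
  induction p2 generalizing r with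
  | nil => exact hnd
  | cons c2 rest ih =>
      simp only [List.foldl_cons]
      exact ih _ (nodup_solveInner2 _ _ _ _ _ hnd)

-- every prime in the generated list is ≥ 2, and the list is strictly increasing
lemma primes_pairwise (n : Int) :
    ((PySem.List.pyRange 2 n 1).filter isprime_alt).Pairwise (· < ·) :=
  (PySem.List.pairwise_lt_pyRange_one 2 n).filter _

lemma primes_ge_two (n : Int) :
    ∀ p ∈ (PySem.List.pyRange 2 n 1).filter isprime_alt, 2 ≤ p := by
  intro p hp
  have := PySem.List.mem_pyRange_one.mp (List.mem_of_mem_filter hp)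
  omega

lemma pow_lists_pairwise (primes : List Int) (hps : primes.Pairwise (· < ·))
    (hge : ∀ p ∈ primes, 2 ≤ p) (f : Int → Int)
    (hmono : ∀ a b : Int, 2 ≤ a → a < b → f a ≤ f b) (q : Int → Bool) :
    (((primes.filter q).map f).Pairwise (· ≤ ·)) := by
  rw [List.pairwise_map]
  apply List.Pairwise.imp_of_mem _ (hps.filter q)
  intro a b ha _ hab
  exact hmono a b (hge a (List.mem_of_mem_filter ha)) hab

-- the body of the equivalence, phrased over the shared lists
lemma solve_eq (limit : Int) (h : 0 ≤ limit) : solve limit = solve_alt limit := by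
  unfold solve solve_alt
  rw [getprimes_eq]
  set primes := (PySem.List.pyRange 2 ((Nat.sqrt limit.toNat : Int) + 1) 1).filter isprime_alt with hprimes
  simp only []
  set p2 := (primes.filter (fun p => decide (p*p < limit))).map (fun p => p*p) with hp2
  set p3 := (primes.filter (fun p => decide (p*p*p < limit))).map (fun p => p*p*p) with hp3
  set p4 := (primes.filter (fun p => decide (p*p*p*p < limit))).map (fun p => p*p*p*p) with hp4
  have hps : primes.Pairwise (· < ·) := primes_pairwise _
  have hge : ∀ p ∈ primes, 2 ≤ p := primes_ge_two _
  have hs3 : p3.Pairwise (· ≤ ·) := by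
    apply pow_lists_pairwise primes hps hge
    intro a b ha hab
    have h1 : a * a ≤ b * b := by nlinarith
    nlinarith [mul_le_mul h1 (le_of_lt hab) (by omega : (0:Int) ≤ a) (le_trans (mul_self_nonneg a) h1)]
  have hs4 : p4.Pairwise (· ≤ ·) := by
    apply pow_lists_pairwise primes hps hge
    intro a b ha hab
    have h1 : a * a ≤ b * b := by nlinarith
    have h2 : (a * a) * (a * a) ≤ (b * b) * (b * b) :=
      mul_le_mul h1 h1 (mul_self_nonneg a) (le_trans (mul_self_nonneg a) h1)
    nlinarith [h2]
  have h4nn : ∀ c ∈ p4, 0 ≤ c := by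
    intro c hc
    rcases List.mem_map.mp hc with ⟨p, _, rfl⟩
    nlinarith [mul_self_nonneg p, mul_self_nonneg (p*p)]
  -- the two result sets have the same members
  have hmem : ∀ a : Int,
      (a ∈ p2.foldl (fun r c2 => solveInner2 limit c2 p4 p3 r) PySem.Set.empty) ↔
      (a ∈ (p2.foldl (fun s a =>
              p3.foldl (fun s b => if a + b ≤ limit then PySem.Set.add s (a + b) else s) s)
              PySem.Set.empty).foldl (fun s sv =>
              p4.foldl (fun s c => if sv + c ≤ limit then PySem.Set.add s (sv + c) else s) s)
              PySem.Set.empty) := by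
    intro a
    rw [mem_outer _ _ _ _ _ hs3 hs4 h4nn]
    -- characterize B's pair-sum set
    have hpair : ∀ s : Int,
        s ∈ p2.foldl (fun s a =>
            p3.foldl (fun s b => if a + b ≤ limit then PySem.Set.add s (a + b) else s) s)
            PySem.Set.empty ↔
        ∃ c2 ∈ p2, ∃ c3 ∈ p3, c2 + c3 ≤ limit ∧ s = c2 + c3 := by
      intro s
      have : ∀ (init : PySem.Set Int),
          s ∈ p2.foldl (fun s a =>
              p3.foldl (fun s b => if a + b ≤ limit then PySem.Set.add s (a + b) else s) s)
              init ↔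
          s ∈ init ∨ ∃ c2 ∈ p2, ∃ c3 ∈ p3, c2 + c3 ≤ limit ∧ s = c2 + c3 := by
        induction p2 with
        | nil => simp
        | cons c2 rest ih =>
            intro init
            simp only [List.foldl_cons]
            rw [ih, mem_foldl_add_if p3 _ (fun b => c2 + b ≤ limit) (fun b => c2 + b)]
            constructor
            · rintro ((hi | ⟨b, hb, hle, rfl⟩) | ⟨c2', hc2', rest'⟩)
              · exact Or.inl hi
              · exact Or.inr ⟨c2, List.mem_cons_self, b, hb, hle, rfl⟩
              · exact Or.inr ⟨c2', List.mem_cons_of_mem _ hc2', rest'⟩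
            · rintro (hi | ⟨c2', hc2', b, hb, hle, rfl⟩)
              · exact Or.inl (Or.inl hi)
              · rcases List.mem_cons.mp hc2' with rfl | hmem
                · exact Or.inl (Or.inr ⟨b, hb, hle, rfl⟩)
                · exact Or.inr ⟨c2', hmem, b, hb, hle, rfl⟩
      simpa using this PySem.Set.empty
    -- characterize B's final set
    have hfin : ∀ (ps : PySem.Set Int),
        a ∈ ps.foldl (fun s sv =>
            p4.foldl (fun s c => if sv + c ≤ limit then PySem.Set.add s (sv + c) else s) s)
            PySem.Set.empty ↔
        ∃ sv ∈ ps, ∃ c4 ∈ p4, sv + c4 ≤ limit ∧ a = sv + c4 := by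
      intro ps
      have : ∀ (init : PySem.Set Int),
          a ∈ ps.foldl (fun s sv =>
              p4.foldl (fun s c => if sv + c ≤ limit then PySem.Set.add s (sv + c) else s) s)
              init ↔
          a ∈ init ∨ ∃ sv ∈ ps, ∃ c4 ∈ p4, sv + c4 ≤ limit ∧ a = sv + c4 := by
        induction ps with
        | nil => simp
        | cons sv rest ih =>
            intro init
            simp only [List.foldl_cons]
            rw [ih, mem_foldl_add_if p4 _ (fun c => sv + c ≤ limit) (fun c => sv + c)]
            constructor
            · rintro ((hi | ⟨c, hc, hle, rfl⟩) | ⟨sv', hsv', rest'⟩)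
              · exact Or.inl hi
              · exact Or.inr ⟨sv, List.mem_cons_self, c, hc, hle, rfl⟩
              · exact Or.inr ⟨sv', List.mem_cons_of_mem _ hsv', rest'⟩
            · rintro (hi | ⟨sv', hsv', c, hc, hle, rfl⟩)
              · exact Or.inl (Or.inl hi)
              · rcases List.mem_cons.mp hsv' with rfl | hmem
                · exact Or.inl (Or.inr ⟨c, hc, hle, rfl⟩)
                · exact Or.inr ⟨sv', hmem, c, hc, hle, rfl⟩
      simpa using this PySem.Set.empty
    rw [hfin]
    constructor
    · rintro (h0 | ⟨c2, hc2, c3, hc3, c4, hc4, hle, rfl⟩)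
      · simp [PySem.Set.empty] at h0
      · have hc4nn := h4nn _ hc4
        exact ⟨c2 + c3, (hpair _).mpr ⟨c2, hc2, c3, hc3, by omega, rfl⟩,
               c4, hc4, by omega, by ring⟩
    · rintro ⟨sv, hsv, c4, hc4, hle, rfl⟩
      rcases (hpair _).mp hsv with ⟨c2, hc2, c3, hc3, _, rfl⟩
      exact Or.inr ⟨c2, hc2, c3, hc3, c4, hc4, by omega, by ring⟩
  -- both are nodup lists with the same members, hence a permutation, hence equal length
  have hndA := nodup_outer limit p2 p3 p4 PySem.Set.empty List.nodup_nil
  have hndB' : ((p2.foldl (fun s a =>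
          p3.foldl (fun s b => if a + b ≤ limit then PySem.Set.add s (a + b) else s) s)
          PySem.Set.empty).foldl (fun s sv =>
          p4.foldl (fun s c => if sv + c ≤ limit then PySem.Set.add s (sv + c) else s) s)
          PySem.Set.empty).Nodup := by
    have step : ∀ (l : List Int) (init : PySem.Set Int), init.Nodup →
        (l.foldl (fun s sv =>
          p4.foldl (fun s c => if sv + c ≤ limit then PySem.Set.add s (sv + c) else s) s)
          init).Nodup := by
      intro l
      induction l with
      | nil => intro init h0; exact h0
      | cons sv rest ih =>
          intro init h0
          simp only [List.foldl_cons]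
          exact ih _ (nodup_foldl_add_if p4 init (fun c => sv + c ≤ limit) (fun c => sv + c) h0)
    exact step _ _ List.nodup_nil
  have hlen := ((List.perm_ext_iff_of_nodup hndA hndB').mpr hmem).length_eq
  simp only [PySem.Set.len, PySem.Set.empty] at hlen ⊢
  rw [hlen]

-- ===== VERDICT (by name: the statement is the Claim_ definition above) =====
theorem solve_spec : Claim_equal_solve := by
  intro limit _ hpre
  unfold Spec_solve
  exact solve_eq limit hpre
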